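-- pv_equiv track=rewrite | github.com/John75SunCity/ssh-git-github.com-odoo-odoo.git-18.0 | development-tools/precision_syntax_fixer.py | fix_unclosed_parentheses
-- ===== SOURCE A (Python) =====
-- def fix_unclosed_parentheses(content):
--     """Fix unclosed parentheses by analyzing context."""
--     lines = content.split("\n")
--     fixed_lines = []
--
--     i = 0
--     while i < len(lines):
--         line = lines[i]
--
--         # Check if this line starts a field definition
--         if "= fields." in line and "(" in line:
--             # Collect all related lines
--             field_lines = [line]
--             paren_count = line.count("(") - line.count(")")
--             j = i + 1
--
--             # Continue collecting lines until parentheses are balanced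
--             while j < len(lines) and paren_count > 0:
--                 next_line = lines[j]
--                 field_lines.append(next_line)
--                 paren_count += next_line.count("(") - next_line.count(")")
--                 j += 1
--
--             # If parentheses are still unbalanced, fix it
--             if paren_count > 0:
--                 # Add missing closing parentheses to the last line
--                 field_lines[-1] = field_lines[-1].rstrip() + ")" * paren_count
--
--             fixed_lines.extend(field_lines)
--             i = j
--         else:
--             fixed_lines.append(line)
--             i += 1
--
--     return "\n".join(fixed_lines)
-- ===== SOURCE B (Python) =====
-- def fix_unclosed_parentheses(content):
--     """Fix unclosed parentheses by analyzing context."""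
--     lines = content.split("\n")
--     # Single state-machine scan: open_count > 0 means we are inside an
--     # unbalanced field-definition block.  The only edit the algorithm can
--     # ever make is padding the final line when the scan ends still open.
--     open_count = 0
--     for line in lines:
--         if open_count > 0:
--             open_count += line.count("(") - line.count(")")
--         elif "= fields." in line and "(" in line:
--             open_count = line.count("(") - line.count(")")
--     if open_count > 0 and lines:
--         lines[-1] = lines[-1].rstrip() + ")" * open_count
--     return "\n".join(lines)
-- ===== Notes on version B (the rewrite author's own statement) =====
-- stated objective: simpler
-- what changed: Replaces the nested while-loops that materialize each field block in a list and splice it back with a single state-machine pass keeping only an integer open-paren counter, exploiting the fact that the only possible edit is padding the final line when the scan ends inside an unbalanced block.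
import Mathlib
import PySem

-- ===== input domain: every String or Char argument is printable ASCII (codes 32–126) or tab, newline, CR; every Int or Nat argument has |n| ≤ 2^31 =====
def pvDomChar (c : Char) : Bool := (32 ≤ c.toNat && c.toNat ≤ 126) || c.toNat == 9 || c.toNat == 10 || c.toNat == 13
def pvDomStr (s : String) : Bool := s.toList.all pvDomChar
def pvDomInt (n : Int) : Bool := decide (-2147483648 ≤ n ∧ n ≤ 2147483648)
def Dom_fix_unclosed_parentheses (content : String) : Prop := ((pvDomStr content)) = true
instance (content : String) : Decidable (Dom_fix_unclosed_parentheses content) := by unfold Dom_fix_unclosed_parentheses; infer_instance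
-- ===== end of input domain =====

-- B replaces A's nested while-loops (which collect each field block into a list and splice
-- it back) by a single state-machine pass over the lines keeping only an integer counter;
-- objective: simpler. Return values proved equal on all inputs (A is total).

-- ===== PORT A =====
-- shared vocabulary of both Pythons: line.count("(") - line.count(")"), and the
-- field-definition test '"= fields." in line and "(" in line'
def pvDelta (l : String) : Int :=
  (PySem.Str.count l "(" : Int) - (PySem.Str.count l ")" : Int)

def pvIsField (l : String) : Bool :=
  PySem.Str.isIn "= fields." l && PySem.Str.isIn "(" l

-- xs[-1] = xs[-1].rstrip() + ")" * k  (both Pythons perform exactly this on a nonempty list)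
def pvPadLast (k : Int) : List String → List String
  | [] => []
  | [x] => [PySem.Str.rstrip x ++ String.ofList (List.replicate k.toNat ')')]
  | x :: y :: xs => x :: pvPadLast k (y :: xs)

-- A's inner while: collect lines while paren_count > 0; returns (collected, remaining, count)
def pvCollect (pc : Int) : List String → List String × List String × Int
  | [] => ([], [], pc)
  | l :: rs =>
    if pc > 0 then
      let r := pvCollect (pc + pvDelta l) rs
      (l :: r.1, r.2.1, r.2.2)
    else ([], l :: rs, pc)

theorem pvCollect_rest_length_le (rest : List String) (pc : Int) :
    (pvCollect pc rest).2.1.length ≤ rest.length := by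
  induction rest generalizing pc with
  | nil => simp [pvCollect]
  | cons l rs ih =>
    simp only [pvCollect]
    split
    · exact le_trans (ih _) (Nat.le_succ _)
    · exact le_refl _

-- A's outer while over the line list
def pvLoop : List String → List String
  | [] => []
  | l :: rest =>
    if pvIsField l then
      let c := pvCollect (pvDelta l) rest
      let block := l :: c.1
      (if c.2.2 > 0 then pvPadLast c.2.2 block else block) ++ pvLoop c.2.1
    else
      l :: pvLoop rest
termination_by xs => xs.length
decreasing_by
  · exact Nat.lt_succ_of_le (pvCollect_rest_length_le rest (pvDelta l))
  · exact Nat.lt_succ_of_le (le_refl _)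

def fix_unclosed_parentheses (content : String) : String :=
  PySem.Str.join "\n" (pvLoop ((PySem.Str.split? content "\n").getD []))

-- ===== PORT B =====
-- B's state transition for one line
def pvStep (s : Int) (l : String) : Int :=
  if s > 0 then s + pvDelta l
  else if pvIsField l then pvDelta l
  else s

def fix_unclosed_parentheses_alt (content : String) : String :=
  let lines := (PySem.Str.split? content "\n").getD []
  let oc := lines.foldl pvStep 0
  PySem.Str.join "\n" (if 0 < oc ∧ lines ≠ [] then pvPadLast oc lines else lines)

-- ===== PRECONDITION & SPEC =====
def Spec_fix_unclosed_parentheses (content : String) (out : String) : Prop := out = fix_unclosed_parentheses_alt content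
instance (content : String) (out : String) : Decidable (Spec_fix_unclosed_parentheses content out) := by unfold Spec_fix_unclosed_parentheses; infer_instance

-- ===== CLAIM (what is proved, stated in full; the proofs are below) =====
def Claim_equal_fix_unclosed_parentheses : Prop := ∀ (content : String), Dom_fix_unclosed_parentheses content → Spec_fix_unclosed_parentheses content (fix_unclosed_parentheses content)

-- ===== LEMMAS AND PROOFS =====

theorem pvPadLast_cons (k : Int) (x : String) (l : List String) (h : l ≠ []) :
    pvPadLast k (x :: l) = x :: pvPadLast k l := by
  cases l with
  | nil => exact absurd rfl h
  | cons y ys => rfl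

theorem pvPadLast_append (k : Int) (xs ys : List String) (h : ys ≠ []) :
    pvPadLast k (xs ++ ys) = xs ++ pvPadLast k ys := by
  induction xs with
  | nil => rfl
  | cons x xs ih =>
    have hne : xs ++ ys ≠ [] := by
      intro hc; exact h (List.eq_nil_of_append_eq_nil hc).2
    simp [pvPadLast_cons k x (xs ++ ys) hne, ih]

theorem pvCollect_nonpos (rest : List String) (pc : Int) (h : ¬ pc > 0) :
    pvCollect pc rest = ([], rest, pc) := by
  cases rest with
  | nil => rfl
  | cons l rs => simp [pvCollect, h]

-- specification of A's inner while for a positive initial count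
theorem pvCollect_spec (rest : List String) (pc : Int) (h : pc > 0) :
    (pvCollect pc rest).1 ++ (pvCollect pc rest).2.1 = rest ∧
    List.foldl pvStep pc (pvCollect pc rest).1 = (pvCollect pc rest).2.2 ∧
    ((pvCollect pc rest).2.2 > 0 → (pvCollect pc rest).2.1 = []) := by
  induction rest generalizing pc with
  | nil => exact ⟨rfl, rfl, fun _ => rfl⟩
  | cons l rs ih =>
    simp only [pvCollect, if_pos h]
    by_cases h' : pc + pvDelta l > 0
    · obtain ⟨h1, h2, h3⟩ := ih (pc + pvDelta l) h'
      refine ⟨by simpa using h1, ?_, h3⟩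
      simpa [List.foldl, pvStep, if_pos h] using h2
    · rw [pvCollect_nonpos rs _ h']
      exact ⟨rfl, by simp [List.foldl, pvStep, if_pos h], fun hc => absurd hc h'⟩

-- B's fold started in any two non-open states agrees up to both staying non-open
theorem pvStep_agree (xs : List String) (s : Int) (hs : ¬ s > 0) :
    List.foldl pvStep s xs = List.foldl pvStep 0 xs ∨
    (¬ List.foldl pvStep s xs > 0 ∧ ¬ List.foldl pvStep 0 xs > 0) := by
  induction xs generalizing s with
  | nil => exact Or.inr ⟨hs, by norm_num⟩
  | cons l rs ih =>
    simp only [List.foldl]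
    by_cases hf : pvIsField l
    · left
      have : pvStep s l = pvStep 0 l := by simp [pvStep, hs, hf]
      rw [this]
    · have h1 : pvStep s l = s := by simp [pvStep, hs, hf]
      have h2 : pvStep 0 l = 0 := by simp [pvStep, hf]
      rw [h1, h2]
      exact ih s hs

-- gluing a closed (non-open final state) prefix emitted verbatim by A onto the
-- already-rewritten tail
theorem pvGlue (p r : List String) (s : Int) (hs : ¬ s > 0)
    (hloop : pvLoop r =
      if 0 < List.foldl pvStep 0 r ∧ r ≠ [] then pvPadLast (List.foldl pvStep 0 r) r else r) :
    p ++ pvLoop r =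
      if 0 < List.foldl pvStep s r ∧ p ++ r ≠ [] then
        pvPadLast (List.foldl pvStep s r) (p ++ r)
      else p ++ r := by
  rcases pvStep_agree r s hs with heq | ⟨ha, hb⟩
  · rw [heq, hloop]
    by_cases hpos : 0 < List.foldl pvStep 0 r
    · have hrne : r ≠ [] := by
        intro hnil; rw [hnil] at hpos; simp [List.foldl] at hpos
      rw [if_pos ⟨hpos, hrne⟩, if_pos ⟨hpos, by simp [List.append_eq_nil_iff, hrne]⟩,
          pvPadLast_append _ _ _ hrne]
    · rw [if_neg (by tauto), if_neg (by tauto)]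
  · rw [hloop, if_neg (by tauto), if_neg (by tauto)]

-- the heart of the equivalence: A's splice-back loop equals B's "pad the last line iff
-- the scan ends open" reading, for every list of lines
theorem pvLoop_eq (n : Nat) : ∀ lines : List String, lines.length ≤ n →
    pvLoop lines =
      if 0 < List.foldl pvStep 0 lines ∧ lines ≠ [] then
        pvPadLast (List.foldl pvStep 0 lines) lines
      else lines := by
  induction n with
  | zero =>
    intro lines h
    have : lines = [] := List.eq_nil_of_length_eq_zero (Nat.le_zero.mp h)
    subst this; simp [pvLoop]
  | succ n ih =>
    intro lines hlen
    cases lines with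
    | nil => simp [pvLoop]
    | cons l rest =>
      have hrest : rest.length ≤ n := Nat.le_of_succ_le_succ hlen
      by_cases hf : pvIsField l
      · -- field-definition line: A enters its inner collection loop
        rw [pvLoop, if_pos hf]
        simp only [List.foldl]
        have hstep : pvStep 0 l = pvDelta l := by simp [pvStep, hf]
        rw [hstep]
        by_cases hd : pvDelta l > 0
        · obtain ⟨h1, h2, h3⟩ := pvCollect_spec rest (pvDelta l) hd
          set c := pvCollect (pvDelta l) rest with hc
          have hfold : List.foldl pvStep (pvDelta l) rest = List.foldl pvStep c.2.2 c.2.1 := by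
            rw [← h1, List.foldl_append, h2]
          by_cases hp : c.2.2 > 0
          · -- still open at exit ⇒ the input was exhausted: pad the last collected line
            have hr : c.2.1 = [] := h3 hp
            rw [hr, List.append_nil] at h1
            rw [hr] at hfold
            simp only [List.foldl] at hfold
            rw [hr, h1, hfold, if_pos hp, if_pos ⟨hp, by simp⟩, pvLoop, List.append_nil]
          · -- block closed before exhaustion: emitted verbatim, scan continues closed
            rw [if_neg hp, hfold]
            have hlen' : c.2.1.length ≤ n := le_trans (by rw [← h1]; simp) hrest
            have := pvGlue (l :: c.1) c.2.1 c.2.2 hp (ih c.2.1 hlen')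
            simpa [← h1] using this
        · -- starting line already balanced (or over-closed): block is just this line
          rw [pvCollect_nonpos rest (pvDelta l) hd]
          dsimp only
          rw [if_neg hd]
          simpa using pvGlue [l] rest (pvDelta l) hd (ih rest hrest)
      · -- ordinary line: emitted directly, state stays closed (0)
        rw [pvLoop, if_neg hf]
        simp only [List.foldl]
        have hstep : pvStep 0 l = 0 := by simp [pvStep, hf]
        rw [hstep]
        simpa using pvGlue [l] rest 0 (by norm_num) (ih rest hrest)

-- ===== VERDICT (by name: the statement is the Claim_ definition above) =====
theorem fix_unclosed_parentheses_spec : Claim_equal_fix_unclosed_parentheses := by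
  intro content _
  unfold Spec_fix_unclosed_parentheses fix_unclosed_parentheses fix_unclosed_parentheses_alt
  rw [pvLoop_eq ((PySem.Str.split? content "\n").getD []).length _ (le_refl _)]
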